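-- pv_equiv track=rewrite | github.com/wyk18703232953/myResearch | codeComplex/data/filteredData/python/logn/python_logn_0092.py | solve
-- ===== SOURCE A (Python) =====
-- def solve(l_val, r_val):
--     # Original logic wrapped into a function operating on l_val, r_val
--     numeros = [l_val, r_val]
--
--     l = bin(numeros[0])
--     r = bin(numeros[1])
--
--     p = -1
--     if len(r) == len(l):
--         for i in range(len(l)):
--             if l[i] != r[i]:
--                 p = i
--                 break
--         if numeros[0] != numeros[1]:
--             saida = 2 ** (len(r) - p) - 1
--             return saida
--         else:
--             return 0
--     else:
--         if numeros[0] != numeros[1]: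
--             saida = 2 ** (len(r) - 2) - 1
--             return saida
--         else:
--             return 0
-- ===== SOURCE B (Python) =====
-- def solve(l_val, r_val):
--     # Strip the common prefix of the binary strings; the answer is all-ones over
--     # the remaining suffix.
--     if l_val == r_val:
--         return 0
--     l, r = bin(l_val), bin(r_val)
--     if len(l) != len(r):
--         return 2 ** (len(r) - 2) - 1
--     while l[0] == r[0]:
--         l, r = l[1:], r[1:]
--     return 2 ** len(r) - 1
-- ===== Notes on version B (the rewrite author's own statement) =====
-- stated objective: simpler
-- what changed: Replaces A's indexed for-loop with the sentinel p=-1 and duplicated trailing equality checks by an early return for equal inputs and a loop that strips the common prefix of the two binary strings, the answer being the all-ones value over the remaining suffix (2**len(rest)-1) with no index arithmetic.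
import Mathlib
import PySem

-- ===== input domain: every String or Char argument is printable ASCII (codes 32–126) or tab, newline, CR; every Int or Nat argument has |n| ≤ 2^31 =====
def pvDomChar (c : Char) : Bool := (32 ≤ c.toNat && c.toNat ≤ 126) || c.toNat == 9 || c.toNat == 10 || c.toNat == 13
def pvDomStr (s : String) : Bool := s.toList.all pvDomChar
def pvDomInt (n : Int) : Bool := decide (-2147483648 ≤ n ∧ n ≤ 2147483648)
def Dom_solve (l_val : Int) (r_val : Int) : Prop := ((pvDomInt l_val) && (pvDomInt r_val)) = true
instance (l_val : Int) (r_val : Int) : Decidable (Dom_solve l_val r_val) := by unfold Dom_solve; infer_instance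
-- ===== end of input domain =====

-- B replaces A's index scan with sentinel p and trailing equality checks by an
-- early return and a strip-the-common-prefix loop; objective: simpler.

-- ===== PORT A =====
-- Python's builtin bin(n): a '-0b'/'0b' prefix followed by the binary digits of |n|,
-- most significant first, no leading zeros ('0' for n = 0).  padBits k m emits the
-- low k binary digits of m, MSB first; with k = max (Nat.size |n|) 1 this is exact
-- (Nat.size = Python's bit_length).
def pyDigit (m : Nat) : Char := if m = 1 then '1' else '0'

def padBits : Nat → Nat → List Char
  | 0, _ => []
  | k+1, n => pyDigit (n / 2 ^ k % 2) :: padBits k n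

def pyBin (n : Int) : List Char :=
  (if n < 0 then ['-', '0', 'b'] else ['0', 'b']) ++ padBits (max n.natAbs.size 1) n.natAbs

-- A's loop "for i in range(len(l)): if l[i] != r[i]: p = i; break" scanned over two
-- equal-length strings: index of the first mismatch, or -1 (p's initial value).
def firstDiff : List Char → List Char → Int
  | a :: as, b :: bs =>
    if a ≠ b then 0
    else (let q := firstDiff as bs; if q = -1 then -1 else q + 1)
  | _, _ => -1

def solve (l_val : Int) (r_val : Int) : Int :=
  let l := pyBin l_val
  let r := pyBin r_val
  if r.length = l.length then
    let p := firstDiff l r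
    -- the exponent is nonnegative whenever this branch returns (p < len r), so toNat is exact
    if l_val ≠ r_val then 2 ^ (((r.length : Int) - p).toNat) - 1 else 0
  else
    if l_val ≠ r_val then 2 ^ (((r.length : Int) - 2).toNat) - 1 else 0

-- ===== PORT B =====
-- B's loop "while l[0] == r[0]: l, r = l[1:], r[1:]": strip equal heads in lockstep,
-- return what is left of r.  (The empty base case is unreachable in B: the loop only
-- runs on equal-length unequal strings, so a mismatch is hit first.)
def stripCommon : List Char → List Char → List Char
  | a :: as, b :: bs => if a = b then stripCommon as bs else b :: bs
  | _, r => r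

def solve_alt (l_val : Int) (r_val : Int) : Int :=
  if l_val = r_val then 0
  else
    let l := pyBin l_val
    let r := pyBin r_val
    if l.length ≠ r.length then 2 ^ (r.length - 2) - 1
    else 2 ^ (stripCommon l r).length - 1

-- ===== PRECONDITION & SPEC =====
def Spec_solve (l_val : Int) (r_val : Int) (out : Int) : Prop := out = solve_alt l_val r_val
instance (l_val : Int) (r_val : Int) (out : Int) : Decidable (Spec_solve l_val r_val out) := by unfold Spec_solve; infer_instance

-- ===== CLAIM (what is proved, stated in full; the proofs are below) =====
def Claim_equal_solve : Prop := ∀ (l_val : Int) (r_val : Int), Dom_solve l_val r_val → Spec_solve l_val r_val (solve l_val r_val)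

-- ===== LEMMAS AND PROOFS =====

theorem padBits_length (k n : Nat) : (padBits k n).length = k := by
  induction k generalizing n with
  | zero => rfl
  | succ k ih => simp [padBits, ih]

theorem padBits_inj (k : Nat) : ∀ a b : Nat, padBits k a = padBits k b → a % 2 ^ k = b % 2 ^ k := by
  induction k with
  | zero => intro a b _; simp [Nat.mod_one]
  | succ k ih =>
    intro a b h
    simp only [padBits, List.cons.injEq] at h
    obtain ⟨h1, h2⟩ := h
    have hb : a / 2 ^ k % 2 = b / 2 ^ k % 2 := by
      have ha2 : a / 2 ^ k % 2 = 0 ∨ a / 2 ^ k % 2 = 1 := by omega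
      have hb2 : b / 2 ^ k % 2 = 0 ∨ b / 2 ^ k % 2 = 1 := by omega
      rcases ha2 with h | h <;> rcases hb2 with h' | h' <;>
        simp [pyDigit, h, h'] at h1 ⊢
    have htl := ih a b h2
    have hda : a % 2 ^ (k + 1) = a % 2 ^ k + 2 ^ k * (a / 2 ^ k % 2) := by
      rw [pow_succ]; exact Nat.mod_mul
    have hdb : b % 2 ^ (k + 1) = b % 2 ^ k + 2 ^ k * (b / 2 ^ k % 2) := by
      rw [pow_succ]; exact Nat.mod_mul
    have htop : 2 ^ k * (a / 2 ^ k % 2) = 2 ^ k * (b / 2 ^ k % 2) := by rw [hb]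
    omega

theorem pyBin_inj (l r : Int) (h : pyBin l = pyBin r) : l = r := by
  unfold pyBin at h
  by_cases h1 : l < 0 <;> by_cases h2 : r < 0 <;> simp [h1, h2] at h
  all_goals {
    have hk : max l.natAbs.size 1 = max r.natAbs.size 1 := by
      have := congrArg List.length h
      simpa [padBits_length] using this
    rw [hk] at h
    have hm := padBits_inj _ _ _ h
    have hal : l.natAbs < 2 ^ max r.natAbs.size 1 := by
      rw [← hk]; exact Nat.size_le.mp (le_max_left _ _)
    have har : r.natAbs < 2 ^ max r.natAbs.size 1 := Nat.size_le.mp (le_max_left _ _)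
    rw [Nat.mod_eq_of_lt hal, Nat.mod_eq_of_lt har] at hm
    omega
  }

-- the index of the first mismatch counts what the strip loop does not consume
theorem strip_firstDiff : ∀ (L R : List Char), L.length = R.length → L ≠ R →
    firstDiff L R = (R.length : Int) - (stripCommon L R).length ∧
      1 ≤ (stripCommon L R).length ∧ (stripCommon L R).length ≤ R.length := by
  intro L
  induction L with
  | nil =>
    intro R hlen hne
    cases R with
    | nil => exact absurd rfl hne
    | cons b bs => simp at hlen
  | cons a as ih =>
    intro R hlen hne
    cases R with
    | nil => simp at hlen
    | cons b bs =>
      by_cases hab : a = b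
      · subst hab
        have htne : as ≠ bs := by
          intro hc; exact hne (by rw [hc])
        obtain ⟨e1, e2, e3⟩ := ih bs (by simpa using hlen) htne
        have hq : firstDiff as bs ≠ -1 := by omega
        have hsc : stripCommon (a :: as) (a :: bs) = stripCommon as bs := by
          simp [stripCommon]
        refine ⟨?_, ?_, ?_⟩
        · simp only [firstDiff, hsc, ne_eq, not_true_eq_false, if_false, if_neg hq]
          simp only [List.length_cons]
          push_cast
          omega
        · rw [hsc]; exact e2
        · rw [hsc]; simp only [List.length_cons]; omega
      · refine ⟨?_, ?_, ?_⟩ <;> simp [firstDiff, stripCommon, hab]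

theorem solve_eq (l_val r_val : Int) : solve l_val r_val = solve_alt l_val r_val := by
  by_cases h : l_val = r_val
  · subst h; simp [solve, solve_alt]
  · by_cases hlen : (pyBin r_val).length = (pyBin l_val).length
    · have hne : pyBin l_val ≠ pyBin r_val := fun hc => h (pyBin_inj _ _ hc)
      obtain ⟨e1, e2, e3⟩ := strip_firstDiff (pyBin l_val) (pyBin r_val) hlen.symm hne
      have hA : solve l_val r_val =
          2 ^ (((pyBin r_val).length : Int) - firstDiff (pyBin l_val) (pyBin r_val)).toNat - 1 := by
        simp [solve, hlen, h]
      have hB : solve_alt l_val r_val =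
          2 ^ (stripCommon (pyBin l_val) (pyBin r_val)).length - 1 := by
        simp [solve_alt, h, hlen.symm]
      rw [hA, hB, e1]
      congr 2
      omega
    · have hA : solve l_val r_val = 2 ^ (((pyBin r_val).length : Int) - 2).toNat - 1 := by
        simp [solve, hlen, h]
      have hB : solve_alt l_val r_val = 2 ^ ((pyBin r_val).length - 2) - 1 := by
        have : (pyBin l_val).length ≠ (pyBin r_val).length := fun hc => hlen hc.symm
        simp [solve_alt, h, this]
      rw [hA, hB]
      congr 2
      omega

-- ===== VERDICT (by name: the statement is the Claim_ definition above) =====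
theorem solve_spec : Claim_equal_solve := by
  intro l_val r_val _
  exact solve_eq l_val r_val
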